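-- pv_equiv track=rewrite | github.com/Chaeguevara/playGround | algorithm/6006/Lec10/DFS_practice.py | full_dfs
-- ===== SOURCE A (Python) =====
-- def dfs(Adj: list, s, parent=None, order=None):  # Adj adjacency list, s:start
--     if parent is None:
--         parent = [None] * len(Adj)
--         parent[s] = s
--         order = []
--     for v in Adj[s]:
--         if parent[v] is None:
--             parent[v] = s
--             dfs(Adj,v,parent,order)
--     order.append(s)
--
--     return parent, order
--
-- def full_dfs(Adj):
--     parent = [None] * len(Adj)
--     order = []
--     for u in range(len(Adj)):
--         if parent[u] is None:
--             parent[u] = u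
--             dfs(Adj,u,parent,order)
--     return parent, order
-- ===== SOURCE B (Python) =====
-- def full_dfs(Adj):
--     # Iterative DFS with an explicit stack of [vertex, next-neighbor-index] frames
--     # instead of A's recursion; same discovery and post-order.
--     n = len(Adj)
--     parent = [None] * n
--     order = []
--     for u in range(n):
--         if parent[u] is None:
--             parent[u] = u
--             stack = [[u, 0]]
--             while stack:
--                 s, i = stack[-1]
--                 row = Adj[s]
--                 if i < len(row):
--                     stack[-1][1] = i + 1
--                     v = row[i]
--                     if parent[v] is None:
--                         parent[v] = s
--                         stack.append([v, 0])
--                 else: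
--                     stack.pop()
--                     order.append(s)
--     return parent, order
-- ===== Notes on version B (the rewrite author's own statement) =====
-- stated objective: alternative
-- what changed: Replaced A's recursive DFS (helper dfs calling itself) by an iterative DFS driven by an explicit stack of (vertex, next-neighbor-index) frames, producing the identical parent array and post-order.
import Mathlib
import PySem

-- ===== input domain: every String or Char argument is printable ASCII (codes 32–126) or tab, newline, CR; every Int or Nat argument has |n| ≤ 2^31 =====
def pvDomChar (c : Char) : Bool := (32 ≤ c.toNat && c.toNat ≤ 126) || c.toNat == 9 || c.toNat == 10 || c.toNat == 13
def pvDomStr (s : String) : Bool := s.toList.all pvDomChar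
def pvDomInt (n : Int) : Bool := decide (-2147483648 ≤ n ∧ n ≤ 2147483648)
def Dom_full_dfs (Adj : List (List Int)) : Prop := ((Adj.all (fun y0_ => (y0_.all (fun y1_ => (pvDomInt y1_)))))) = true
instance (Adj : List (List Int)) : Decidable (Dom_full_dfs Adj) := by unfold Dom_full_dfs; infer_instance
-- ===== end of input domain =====

-- B replaces A's recursive DFS by an iterative DFS over an explicit stack of
-- (vertex, next-neighbor-index) frames; same parent array and post-order.
-- A's helper mutates its parent/order arguments, but full_dfs allocates them
-- fresh, so the return value is the whole observable behaviour.

-- Python list index for a list of length n: exact for -n ≤ v < n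
-- (out-of-range indices raise IndexError in Python; Pre_full_dfs excludes them).
def jdx (n : Nat) (v : Int) : Nat := (if v < 0 then v + n else v).toNat

-- needed by loopB's termination measure (cited in decreasing_by)
theorem count_set_some_lt (p : List (Option Int)) (j : Nat) (s : Int)
    (hj : j < p.length) (hn : p.getD j none = none) :
    List.count none (p.set j (some s)) < List.count none p := by
  induction p generalizing j with
  | nil => simp at hj
  | cons a p ih =>
    cases j with
    | zero =>
      rw [List.getD_cons_zero] at hn
      subst hn
      simp
    | succ j =>
      rw [List.getD_cons_succ] at hn
      rw [List.set_cons_succ]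
      simp only [List.count_cons]
      have := ih j (by simpa using hj) hn
      omega

-- ===== PORT A =====
mutual
-- dfs(Adj, s, parent, order), called with parent[s] already set; the fuel is a
-- totality guard on the recursion depth (never exhausted when reached from
-- full_dfs, as the proofs below show)
def dfsA (Adj : List (List Int)) (f : Nat) (s : Int)
    (p : List (Option Int)) (o : List Int) : List (Option Int) × List Int :=
  match f with
  | 0 => (p, o)
  | f' + 1 =>
    let r := dfsForA Adj f' s (Adj.getD (jdx Adj.length s) []) p o
    (r.1, r.2 ++ [s])
  termination_by (f, 0)

-- the "for v in Adj[s]" loop of dfs; the in-range test on the index is a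
-- totality guard (Python raises IndexError there; excluded by Pre_full_dfs)
def dfsForA (Adj : List (List Int)) (f : Nat) (s : Int) (vs : List Int)
    (p : List (Option Int)) (o : List Int) : List (Option Int) × List Int :=
  match vs with
  | [] => (p, o)
  | v :: vs' =>
    let j := jdx p.length v
    if j < p.length ∧ p.getD j none = none then
      let r := dfsA Adj f v (p.set j (some s)) o
      dfsForA Adj f s vs' r.1 r.2
    else
      dfsForA Adj f s vs' p o
  termination_by (f, vs.length + 1)
end

-- the "for u in range(len(Adj))" loop of full_dfs
def outerA (Adj : List (List Int)) (f : Nat) (us : List Nat)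
    (p : List (Option Int)) (o : List Int) : List (Option Int) × List Int :=
  match us with
  | [] => (p, o)
  | u :: us' =>
    if p.getD u none = none then
      let r := dfsA Adj f (u : Int) (p.set u (some (u : Int))) o
      outerA Adj f us' r.1 r.2
    else
      outerA Adj f us' p o

def full_dfs (Adj : List (List Int)) : List Int × List Int :=
  let n := Adj.length
  let r := outerA Adj (n + 1) (List.range n) (List.replicate n none) []
  (r.1.map (fun x => x.getD 0), r.2)

-- ===== PORT B =====
-- the "while stack" loop: each frame is (vertex, index of next neighbor)
def loopB (Adj : List (List Int)) (stack : List (Int × Nat))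
    (p : List (Option Int)) (o : List Int) : List (Option Int) × List Int :=
  match stack with
  | [] => (p, o)
  | (s, i) :: rest =>
    if h : i < (Adj.getD (jdx Adj.length s) []).length then
      let v := (Adj.getD (jdx Adj.length s) [])[i]
      if h2 : jdx p.length v < p.length ∧ p.getD (jdx p.length v) none = none then
        loopB Adj ((v, 0) :: (s, i + 1) :: rest) (p.set (jdx p.length v) (some s)) o
      else
        loopB Adj ((s, i + 1) :: rest) p o
    else
      loopB Adj rest p (o ++ [s])
  termination_by
    (List.count none p,
     (stack.map (fun fr => ((Adj.getD (jdx Adj.length fr.1) []).length - fr.2) + 1)).sum)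
  decreasing_by
  · exact Prod.Lex.left _ _ (count_set_some_lt p _ s h2.1 h2.2)
  · apply Prod.Lex.right
    simp only [List.map_cons, List.sum_cons]
    omega
  · apply Prod.Lex.right
    simp only [List.map_cons, List.sum_cons]
    omega

-- the "for u in range(n)" loop of B's full_dfs
def outerB (Adj : List (List Int)) (us : List Nat)
    (p : List (Option Int)) (o : List Int) : List (Option Int) × List Int :=
  match us with
  | [] => (p, o)
  | u :: us' =>
    if p.getD u none = none then
      let r := loopB Adj [((u : Int), 0)] (p.set u (some (u : Int))) o
      outerB Adj us' r.1 r.2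
    else
      outerB Adj us' p o

def full_dfs_alt (Adj : List (List Int)) : List Int × List Int :=
  let n := Adj.length
  let r := outerB Adj (List.range n) (List.replicate n none) []
  (r.1.map (fun x => x.getD 0), r.2)

-- ===== PRECONDITION & SPEC =====
-- Pre_ excludes exactly the inputs where A raises IndexError: a neighbor outside
-- [-len(Adj), len(Adj)) (Python's negative indices wrap; beyond that it raises).
def Pre_full_dfs (Adj : List (List Int)) : Prop :=
  ∀ row ∈ Adj, ∀ v ∈ row, -(Adj.length : Int) ≤ v ∧ v < (Adj.length : Int)
instance (Adj : List (List Int)) : Decidable (Pre_full_dfs Adj) := by unfold Pre_full_dfs; infer_instance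

def pvWitness_full_dfs : List (List Int) := [[1, 2], [0], [-1], []]

def Spec_full_dfs (Adj : List (List Int)) (out : List Int × List Int) : Prop := out = full_dfs_alt Adj
instance (Adj : List (List Int)) (out : List Int × List Int) : Decidable (Spec_full_dfs Adj out) := by unfold Spec_full_dfs; infer_instance

-- ===== CLAIM (what is proved, stated in full; the proofs are below) =====
def Claim_equal_full_dfs : Prop := ∀ (Adj : List (List Int)), Dom_full_dfs Adj → Pre_full_dfs Adj → Spec_full_dfs Adj (full_dfs Adj)

-- ===== LEMMAS AND PROOFS =====

-- processing the remaining stack with A's recursive routines (proof-layer bridge)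
def finishA (Adj : List (List Int)) (f : Nat) (stack : List (Int × Nat))
    (p : List (Option Int)) (o : List Int) : List (Option Int) × List Int :=
  match stack with
  | [] => (p, o)
  | (s, i) :: rest =>
    let r := dfsForA Adj f s ((Adj.getD (jdx Adj.length s) []).drop i) p o
    finishA Adj f rest r.1 (r.2 ++ [s])

theorem count_set_some_le (p : List (Option Int)) (j : Nat) (s : Int) :
    List.count none (p.set j (some s)) ≤ List.count none p := by
  induction p generalizing j with
  | nil => simp
  | cons a p ih =>
    cases j with
    | zero => simp [List.count_cons]
    | succ j =>
      rw [List.set_cons_succ]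
      simp only [List.count_cons]
      have := ih j
      omega

theorem count_pos_of_getD (p : List (Option Int)) (j : Nat)
    (hj : j < p.length) (hn : p.getD j none = none) :
    1 ≤ List.count none p := by
  rw [List.getD_eq_getElem p none hj] at hn
  exact List.count_pos_iff.mpr (hn ▸ List.getElem_mem hj)

-- the DFS never re-creates unvisited vertices: the count of `none`s only drops
theorem dfs_mono (Adj : List (List Int)) :
    ∀ f : Nat, (∀ s p o, List.count none (dfsA Adj f s p o).1 ≤ List.count none p)
             ∧ (∀ vs s p o, List.count none (dfsForA Adj f s vs p o).1 ≤ List.count none p) := by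
  intro f
  induction f with
  | zero =>
    constructor
    · intro s p o; simp [dfsA]
    · intro vs
      induction vs with
      | nil => intro s p o; simp [dfsForA]
      | cons v vs' ih =>
        intro s p o
        simp only [dfsForA]
        split
        · simp only [dfsA]
          exact le_trans (ih _ _ _) (count_set_some_le _ _ _)
        · exact ih _ _ _
  | succ f ihf =>
    have hFor : ∀ vs s p o, List.count none (dfsForA Adj (f + 1) s vs p o).1 ≤ List.count none p := by
      intro vs
      induction vs with
      | nil => intro s p o; simp [dfsForA]
      | cons v vs' ih =>
        intro s p o
        simp only [dfsForA]
        split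
        · refine le_trans (ih _ _ _) ?_
          refine le_trans ?_ (count_set_some_le p (jdx p.length v) s)
          simp only [dfsA]
          exact ihf.2 _ _ _ _
        · exact ih _ _ _
    constructor
    · intro s p o
      simp only [dfsA]
      exact ihf.2 _ _ _ _
    · exact hFor

-- the DFS preserves the length of the parent array
theorem dfs_len (Adj : List (List Int)) :
    ∀ f : Nat, (∀ s p o, (dfsA Adj f s p o).1.length = p.length)
             ∧ (∀ vs s p o, (dfsForA Adj f s vs p o).1.length = p.length) := by
  intro f
  induction f with
  | zero =>
    constructor
    · intro s p o; simp [dfsA]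
    · intro vs
      induction vs with
      | nil => intro s p o; simp [dfsForA]
      | cons v vs' ih =>
        intro s p o
        simp only [dfsForA]
        split
        · simp only [dfsA]
          rw [ih]; simp
        · exact ih _ _ _
  | succ f ihf =>
    have hFor : ∀ vs s p o, (dfsForA Adj (f + 1) s vs p o).1.length = p.length := by
      intro vs
      induction vs with
      | nil => intro s p o; simp [dfsForA]
      | cons v vs' ih =>
        intro s p o
        simp only [dfsForA]
        split
        · rw [ih]
          simp only [dfsA]
          rw [ihf.2]; simp
        · exact ih _ _ _
    constructor
    · intro s p o
      simp only [dfsA]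
      exact ihf.2 _ _ _ _
    · exact hFor

-- fuel irrelevance: any fuel strictly above the number of unvisited vertices
-- gives the same run of A's recursion
theorem dfs_fuel (Adj : List (List Int)) :
    ∀ f : Nat, (∀ s p o f', List.count none p < f → List.count none p < f' →
                  dfsA Adj f s p o = dfsA Adj f' s p o)
             ∧ (∀ vs s p o f', List.count none p ≤ f → List.count none p ≤ f' →
                  dfsForA Adj f s vs p o = dfsForA Adj f' s vs p o) := by
  intro f
  induction f with
  | zero =>
    constructor
    · intro s p o f' h _; omega
    · intro vs
      induction vs with
      | nil =>
        intro s p o f' _ _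
        cases f' <;> simp [dfsForA]
      | cons v vs' ih =>
        intro s p o f' h h'
        have hg : ¬(jdx p.length v < p.length ∧ p.getD (jdx p.length v) none = none) := by
          rintro ⟨h1, h2⟩
          have := count_pos_of_getD p _ h1 h2
          omega
        rw [dfsForA, dfsForA]
        simp only [if_neg hg]
        exact ih s p o f' h h'
  | succ f ihf =>
    have hA : ∀ s p o f', List.count none p < f + 1 → List.count none p < f' →
        dfsA Adj (f + 1) s p o = dfsA Adj f' s p o := by
      intro s p o f' h h'
      cases f' with
      | zero => omega
      | succ f'' =>
        simp only [dfsA]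
        rw [ihf.2 _ _ _ _ f'' (by omega) (by omega)]
    have hFor : ∀ vs s p o f', List.count none p ≤ f + 1 → List.count none p ≤ f' →
        dfsForA Adj (f + 1) s vs p o = dfsForA Adj f' s vs p o := by
      intro vs
      induction vs with
      | nil =>
        intro s p o f' _ _
        cases f' <;> simp [dfsForA]
      | cons v vs' ih =>
        intro s p o f' h h'
        rw [dfsForA, dfsForA]
        by_cases hg : jdx p.length v < p.length ∧ p.getD (jdx p.length v) none = none
        · simp only [if_pos hg]
          have h1 := count_pos_of_getD p _ hg.1 hg.2
          have hlt := count_set_some_lt p (jdx p.length v) s hg.1 hg.2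
          rw [hA v (p.set (jdx p.length v) (some s)) o f' (by omega) (by omega)]
          have hm : List.count none (dfsA Adj f' v (p.set (jdx p.length v) (some s)) o).1
              ≤ List.count none (p.set (jdx p.length v) (some s)) := (dfs_mono Adj f').1 _ _ _
          exact ih s _ _ f' (by omega) (by omega)
        · simp only [if_neg hg]
          exact ih s p o f' h h'
    exact ⟨hA, hFor⟩

-- main simulation: B's stack loop equals A's recursion run over the whole stack
theorem sim (Adj : List (List Int)) :
    ∀ (stack : List (Int × Nat)) (p : List (Option Int)) (o : List Int),
      ∀ f : Nat, List.count none p ≤ f → loopB Adj stack p o = finishA Adj f stack p o := by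
  intro stack p o
  induction stack, p, o using loopB.induct Adj with
  | case1 p o => intro f _; simp [loopB, finishA]
  | case2 p o s i rest h v h2 ih =>
    intro f hf
    have hveq : v = (Adj.getD (jdx Adj.length s) [])[i] := rfl
    rw [hveq] at h2 ih
    have hdrop := List.drop_eq_getElem_cons h
    have h1 := count_pos_of_getD p _ h2.1 h2.2
    have hlt := count_set_some_lt p (jdx p.length ((Adj.getD (jdx Adj.length s) [])[i])) s h2.1 h2.2
    obtain ⟨f0, rfl⟩ : ∃ f0, f = f0 + 1 := ⟨f - 1, by omega⟩
    rw [loopB]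
    simp only [dif_pos h, dif_pos h2]
    rw [ih (f0 + 1) (by omega)]
    -- now reduce the A-side
    rw [finishA, finishA, finishA]
    rw [hdrop, dfsForA]
    simp only [if_pos h2]
    simp only [dfsA, List.drop_zero]
    rw [dfs_fuel Adj f0 |>.2 _ _ _ _ (f0 + 1) (by omega) (by omega)]
  | case3 p o s i rest h v h2 ih =>
    intro f hf
    have hveq : v = (Adj.getD (jdx Adj.length s) [])[i] := rfl
    rw [hveq] at h2
    have hdrop := List.drop_eq_getElem_cons h
    rw [loopB]
    simp only [dif_pos h, dif_neg h2]
    rw [ih f hf]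
    rw [finishA, finishA]
    rw [hdrop, dfsForA]
    simp only [if_neg h2]
  | case4 p o s i rest h ih =>
    intro f hf
    rw [loopB]
    simp only [dif_neg h]
    rw [ih f hf]
    rw [finishA]
    rw [List.drop_eq_nil_of_le (by omega), dfsForA]

-- the two outer loops agree frame by frame
theorem outer_eq (Adj : List (List Int)) :
    ∀ (us : List Nat) (p : List (Option Int)) (o : List Int),
      p.length = Adj.length →
      outerB Adj us p o = outerA Adj (Adj.length + 1) us p o := by
  intro us
  induction us with
  | nil => intro p o _; simp [outerA, outerB]
  | cons u us' ih =>
    intro p o hp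
    rw [outerA, outerB]
    by_cases hc : p.getD u none = none
    · simp only [if_pos hc]
      have hcnt : List.count none (p.set u (some (u : Int))) ≤ Adj.length := by
        have h1 := count_set_some_le p u (u : Int)
        have h2 := List.count_le_length (l := p) (a := (none : Option Int))
        omega
      rw [sim Adj [((u : Int), 0)] _ o Adj.length hcnt]
      rw [finishA, finishA]
      simp only [List.drop_zero, dfsA]
      exact ih _ _ (by rw [(dfs_len Adj Adj.length).2]; simp [hp])
    · simp only [if_neg hc]
      exact ih p o hp

-- ===== VERDICT (by name: the statement is the Claim_ definition above) =====
theorem full_dfs_spec : Claim_equal_full_dfs := by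
  intro Adj _ _
  unfold Spec_full_dfs
  simp only [full_dfs, full_dfs_alt]
  rw [outer_eq Adj (List.range Adj.length) _ [] (by simp)]
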